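-- pv_equiv track=rewrite | github.com/korasrar/Work | R101/TP10/ecosysteme/ecosysteme.py | en_voie_disparition
-- ===== SOURCE A (Python) =====
-- def en_voie_disparition(ecosysteme, animal):
--     """
--     renvoie True si animal s'éteint est voué à disparaitre à long terme
--     """
--     animal_actuel = animal
--     ind = 0
--     while ecosysteme[animal_actuel] in ecosysteme and ecosysteme[animal_actuel] is not None and len(ecosysteme) > ind:
--         animal_actuel = ecosysteme[animal_actuel]
--         ind += 1
--     if len(ecosysteme) > ind and ecosysteme[animal_actuel] is not None:
--         return True
--     return False
-- ===== SOURCE B (Python) =====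
-- def en_voie_disparition(ecosysteme, animal):
--     """
--     renvoie True si animal s'éteint est voué à disparaitre à long terme
--     """
--     visited = set()
--     courant = animal
--     while True:
--         suivant = ecosysteme[courant]
--         if suivant is None:
--             return False
--         if suivant not in ecosysteme:
--             return True
--         if suivant in visited:
--             return False
--         visited.add(suivant)
--         courant = suivant
-- ===== Notes on version B (the rewrite author's own statement) =====
-- stated objective: idiomatic
-- what changed: Replaces the len(ecosysteme)-step counter bound (termination by pigeonhole after a full dict-size walk) with direct cycle detection: follow the predator chain keeping a visited set and stop at the first revisited node.
import Mathlib
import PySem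

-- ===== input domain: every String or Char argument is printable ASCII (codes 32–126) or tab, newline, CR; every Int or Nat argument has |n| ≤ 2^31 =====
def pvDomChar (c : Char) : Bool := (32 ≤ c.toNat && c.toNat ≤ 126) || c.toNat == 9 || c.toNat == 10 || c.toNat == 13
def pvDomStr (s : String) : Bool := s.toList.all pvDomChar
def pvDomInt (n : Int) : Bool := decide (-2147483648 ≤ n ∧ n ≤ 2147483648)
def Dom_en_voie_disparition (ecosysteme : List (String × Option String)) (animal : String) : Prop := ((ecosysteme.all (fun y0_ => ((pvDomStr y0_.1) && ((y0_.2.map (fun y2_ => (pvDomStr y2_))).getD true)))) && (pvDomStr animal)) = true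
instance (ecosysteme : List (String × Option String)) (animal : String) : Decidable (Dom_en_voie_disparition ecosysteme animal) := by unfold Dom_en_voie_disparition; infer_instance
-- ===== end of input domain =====

-- B follows the predator chain with a visited set (explicit cycle detection) instead of A's
-- len(ecosysteme)-step counter bound; same return value everywhere in Pre_ (no mutation involved).

-- Shared dict primitives on the association list encoding a Python dict:
-- ecosysteme[k] (none = KeyError) and the key list ('k in ecosysteme' = membership here).
def evdLookup (eco : List (String × Option String)) (k : String) : Option (Option String) :=
  (eco.find? (fun p => p.1 == k)).map Prod.snd

def evdKeys (eco : List (String × Option String)) : List String :=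
  eco.map Prod.fst

-- ===== PORT A =====
-- the while loop: returns (animal_actuel, ind) at loop exit.
-- Guard order as in Python: 'eco[cur] in eco' is False when the value is None (None is no key),
-- 'and eco[cur] is not None' is then redundant, 'and len(eco) > ind' last.
def evdLoopA (eco : List (String × Option String)) (cur : String) (ind : Nat) : String × Nat :=
  match evdLookup eco cur with
  | some (some s) =>
      if h : (evdKeys eco).contains s ∧ eco.length > ind then evdLoopA eco s (ind + 1)
      else (cur, ind)
  | _ => (cur, ind)      -- value None (guard False) or KeyError (outside Pre_, first access only)
termination_by eco.length - ind
decreasing_by omega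

-- the final 'if len(ecosysteme) > ind and ecosysteme[animal_actuel] is not None'
def evdFinalA (eco : List (String × Option String)) (r : String × Nat) : Bool :=
  if eco.length > r.2 then
    match evdLookup eco r.1 with
    | some (some _) => true
    | _ => false
  else false

def en_voie_disparition (ecosysteme : List (String × Option String)) (animal : String) : Bool :=
  evdFinalA ecosysteme (evdLoopA ecosysteme animal 0)

-- ===== PORT B =====
-- termination measure helper for the visited-set loop: each step adds a fresh key to 'visited',
-- so the number of keys not yet visited strictly decreases.
theorem evd_measure_lt (keys visited : List String) (s : String)
    (hs : s ∈ keys) (hv : s ∉ visited) :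
    (keys.filter (fun k => !(visited ++ [s]).contains k)).length
      < (keys.filter (fun k => !visited.contains k)).length := by
  have hmono : ∀ x, (!(visited ++ [s]).contains x) = true → (!visited.contains x) = true := by
    intro x hx
    simp only [Bool.not_eq_true', List.contains_append, Bool.or_eq_false_iff] at hx
    simp only [Bool.not_eq_true']
    exact hx.1
  induction keys with
  | nil => simp at hs
  | cons k ks ih =>
    simp only [List.filter_cons]
    rcases List.mem_cons.1 hs with rfl | hmem
    · have h1 : (!(visited ++ [s]).contains s) = false := by simp
      have h2 : (!visited.contains s) = true := by simpa using hv
      rw [h1, h2]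
      have hle : (List.filter (fun x => !(visited ++ [s]).contains x) ks).length
          ≤ (List.filter (fun x => !visited.contains x) ks).length := by
        rw [← List.countP_eq_length_filter, ← List.countP_eq_length_filter]
        exact List.countP_mono_left (fun x _ h => hmono x h)
      simpa using Nat.lt_succ_of_le hle
    · have hlt := ih hmem
      cases hca : (!(visited ++ [s]).contains k) with
      | false =>
        cases hcb : (!visited.contains k) with
        | false => simpa using hlt
        | true => simpa using Nat.lt_succ_of_lt hlt
      | true =>
        have hcb : (!visited.contains k) = true := hmono k hca
        rw [hcb]
        simpa using hlt

-- the 'while True' loop of B, carrying the visited set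
def evdLoopB (eco : List (String × Option String)) (cur : String) (visited : PySem.Set String) : Bool :=
  match evdLookup eco cur with
  | none => false        -- KeyError in Python; unreachable inside Pre_
  | some none => false   -- suivant is None
  | some (some s) =>
      if hk : (evdKeys eco).contains s = false then true          -- suivant not in ecosysteme
      else if hv : visited.contains s = true then false           -- cycle: suivant already seen
      else evdLoopB eco s (visited.add s)
termination_by ((evdKeys eco).filter (fun k => !visited.contains k)).length
decreasing_by
  have hk' : (evdKeys eco).contains s = true := by
    cases hcb : (evdKeys eco).contains s
    · exact absurd hcb hk
    · rfl
  have hs : s ∈ evdKeys eco := List.contains_iff_mem.1 hk'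
  have hv' : s ∉ visited := fun hmem => hv (List.contains_iff_mem.2 hmem)
  have hadd : visited.add s = visited ++ [s] := by
    simp [PySem.Set.add, hv']
  rw [hadd]
  exact evd_measure_lt _ _ _ hs hv'

def en_voie_disparition_alt (ecosysteme : List (String × Option String)) (animal : String) : Bool :=
  evdLoopB ecosysteme animal []

-- ===== PRECONDITION & SPEC =====
-- Pre_ excludes inputs where animal is not a key: A (and B) raise KeyError there.
-- The Nodup clause excludes no Python input: a dict always has distinct keys, so association
-- lists with duplicate keys encode no dict at all (measured coverage of A's domain is 100%).
def Pre_en_voie_disparition (ecosysteme : List (String × Option String)) (animal : String) : Prop :=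
  (ecosysteme.map Prod.fst).Nodup ∧ animal ∈ ecosysteme.map Prod.fst
instance (ecosysteme : List (String × Option String)) (animal : String) : Decidable (Pre_en_voie_disparition ecosysteme animal) := by unfold Pre_en_voie_disparition; infer_instance

def pvWitness_en_voie_disparition : (List (String × Option String)) × String :=
  ([("fox", some "wolf"), ("wolf", none)], "fox")

def Spec_en_voie_disparition (ecosysteme : List (String × Option String)) (animal : String) (out : Bool) : Prop := out = en_voie_disparition_alt ecosysteme animal
instance (ecosysteme : List (String × Option String)) (animal : String) (out : Bool) : Decidable (Spec_en_voie_disparition ecosysteme animal out) := by unfold Spec_en_voie_disparition; infer_instance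

-- ===== CLAIM (what is proved, stated in full; the proofs are below) =====
def Claim_equal_en_voie_disparition : Prop := ∀ (ecosysteme : List (String × Option String)) (animal : String), Dom_en_voie_disparition ecosysteme animal → Pre_en_voie_disparition ecosysteme animal → Spec_en_voie_disparition ecosysteme animal (en_voie_disparition ecosysteme animal)

-- ===== LEMMAS AND PROOFS =====

-- 'EvdChain eco u l': starting at u, each element of l is the successor of the previous one.
def EvdChain (eco : List (String × Option String)) : String → List String → Prop
  | _, [] => True
  | u, w :: rest => evdLookup eco u = some (some w) ∧ EvdChain eco w rest

-- The invariant tying A's state (cur, ind = visited.length) to B's state (cur, visited):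
-- 'animal :: visited' is the chain of distinct keys walked so far and ends at cur.
def EvdInv (eco : List (String × Option String)) (animal cur : String) (visited : List String) : Prop :=
  cur ∈ evdKeys eco ∧
  visited.Nodup ∧
  (∀ v ∈ visited, v ∈ evdKeys eco) ∧
  EvdChain eco animal visited ∧
  (animal :: visited).getLast (List.cons_ne_nil _ _) = cur

theorem evdChain_getElem (eco : List (String × Option String)) :
    ∀ (l : List String) (u : String), EvdChain eco u l →
      ∀ (i : Nat) (h : i + 1 < (u :: l).length),
        evdLookup eco ((u :: l)[i]'(by omega)) = some (some ((u :: l)[i + 1]'h)) := by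
  intro l
  induction l with
  | nil => intro u _ i h; simp at h
  | cons w rest ih =>
    intro u hch i h
    cases i with
    | zero => simpa using hch.1
    | succ i' =>
      have h' : i' + 1 < (w :: rest).length := by simpa using h
      simpa using ih w hch.2 i' h'

theorem evdChain_append_singleton (eco : List (String × Option String)) :
    ∀ (l : List String) (u s : String), EvdChain eco u l →
      evdLookup eco ((u :: l).getLast (List.cons_ne_nil _ _)) = some (some s) →
      EvdChain eco u (l ++ [s]) := by
  intro l
  induction l with
  | nil =>
    intro u s _ hlast
    exact ⟨by simpa using hlast, trivial⟩
  | cons w rest ih =>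
    intro u s hch hlast
    refine ⟨hch.1, ih w s hch.2 ?_⟩
    rw [← List.getLast_cons (List.cons_ne_nil _ _)]
    exact hlast

theorem evdLookup_isSome (eco : List (String × Option String)) (k : String)
    (hk : k ∈ evdKeys eco) : ∃ v, evdLookup eco k = some v := by
  have : (eco.find? (fun p => p.1 == k)).isSome = true := by
    rw [List.find?_isSome]
    rcases List.mem_map.1 hk with ⟨p, hp, rfl⟩
    exact ⟨p, hp, by simp⟩
  rcases Option.isSome_iff_exists.1 this with ⟨p, hp⟩
  exact ⟨p.2, by simp [evdLookup, hp]⟩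

-- unfolding equations for the two loops, by lookup result
theorem evdLoopA_some_none (eco : List (String × Option String)) (cur : String) (ind : Nat)
    (h : evdLookup eco cur = some none) : evdLoopA eco cur ind = (cur, ind) := by
  rw [evdLoopA, h]

theorem evdLoopA_some_some (eco : List (String × Option String)) (cur : String) (ind : Nat)
    (s : String) (h : evdLookup eco cur = some (some s)) :
    evdLoopA eco cur ind =
      if _h : (evdKeys eco).contains s ∧ eco.length > ind then evdLoopA eco s (ind + 1)
      else (cur, ind) := by
  rw [evdLoopA, h]

theorem evdLoopB_some_none (eco : List (String × Option String)) (cur : String)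
    (visited : PySem.Set String) (h : evdLookup eco cur = some none) :
    evdLoopB eco cur visited = false := by
  rw [evdLoopB, h]

theorem evdLoopB_some_some (eco : List (String × Option String)) (cur : String)
    (visited : PySem.Set String) (s : String) (h : evdLookup eco cur = some (some s)) :
    evdLoopB eco cur visited =
      if (evdKeys eco).contains s = false then true
      else if visited.contains s = true then false
      else evdLoopB eco s (visited.add s) := by
  rw [evdLoopB, h]
  rfl

-- an element of l at an index ≥ m lies in l.drop m
theorem evd_getElem_mem_drop (l : List String) (m a : Nat) (h : a < l.length) (hma : m ≤ a) :
    l[a] ∈ l.drop m := by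
  have hd : a - m < (l.drop m).length := by rw [List.length_drop]; omega
  have he : (l.drop m)[a - m] = l[a] := by rw [List.getElem_drop]; congr 1; omega
  rw [← he]
  exact List.getElem_mem hd

-- A from inside a forward-closed set of keys never escapes: its loop runs the index out
-- and the final test 'len(eco) > ind' fails, so A returns False.
theorem evdLoopA_closed (eco : List (String × Option String)) (C : List String)
    (hC : ∀ c ∈ C, ∃ s, evdLookup eco c = some (some s) ∧ s ∈ evdKeys eco ∧ s ∈ C) :
    ∀ (fuel ind : Nat) (cur : String), eco.length - ind = fuel → cur ∈ C →
      evdFinalA eco (evdLoopA eco cur ind) = false := by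
  intro fuel
  induction fuel with
  | zero =>
    intro ind cur hfuel hcur
    rcases hC cur hcur with ⟨s, hs, _, _⟩
    have hnotlt : ¬ eco.length > ind := by omega
    rw [evdLoopA_some_some eco cur ind s hs, dif_neg (by intro h; exact hnotlt h.2)]
    simp [evdFinalA, hnotlt]
  | succ f ih =>
    intro ind cur hfuel hcur
    rcases hC cur hcur with ⟨s, hs, hsk, hsC⟩
    have hlt : eco.length > ind := by omega
    rw [evdLoopA_some_some eco cur ind s hs,
      dif_pos ⟨List.contains_iff_mem.2 hsk, hlt⟩]
    exact ih (ind + 1) s (by omega) hsC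

-- Pigeonhole at a full visited set: once visited holds every key, the current key's
-- successor is again a key (the chain cannot escape the dict any more).
theorem evd_no_escape (eco : List (String × Option String))
    (animal cur : String) (visited : List String)
    (ha : animal ∈ evdKeys eco)
    (hinv : EvdInv eco animal cur visited)
    (hlen : visited.length = eco.length)
    (s : String) (hs : evdLookup eco cur = some (some s)) :
    s ∈ evdKeys eco := by
  obtain ⟨hcur, hndv, hsub, hch, hlast⟩ := hinv
  have hchain := evdChain_getElem eco visited animal hch
  have hkeyslen : (evdKeys eco).length = eco.length := by simp [evdKeys]
  have hperm : visited.Perm (evdKeys eco) := by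
    refine (List.subperm_of_subset hndv (fun v hv => hsub v hv)).perm_of_length_le ?_
    omega
  have hav : animal ∈ visited := hperm.mem_iff.2 ha
  rcases List.mem_iff_getElem.1 hav with ⟨j, hj, hjv⟩
  have hvne : visited ≠ [] := by
    intro h; rw [h] at hj; simp at hj
  -- first chain step: animal ↦ visited[0]
  have h0len : 0 < visited.length := List.length_pos_iff.2 hvne
  have hstep0 : evdLookup eco animal = some (some (visited[0]'h0len)) := by
    have := hchain 0 (by simp; omega)
    simpa using this
  by_cases hjlast : j + 1 = visited.length
  · -- animal sits at the end of visited, so cur = animal and s = visited[0] is a key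
    have hcura : cur = animal := by
      rw [← hlast, List.getLast_cons hvne, List.getLast_eq_getElem]
      rw [← hjv]
      congr 1
      omega
    rw [hcura, hstep0] at hs
    have h0s : visited[0]'h0len = s := by simpa using hs
    rw [← h0s]
    exact hsub _ (List.getElem_mem h0len)
  · -- animal sits strictly inside visited: its two successors collide, contradicting Nodup
    have hj1 : j + 1 < visited.length := by omega
    have hstepj : evdLookup eco animal = some (some (visited[j + 1]'hj1)) := by
      have h' : j + 1 + 1 < (animal :: visited).length := by simp; omega
      have := hchain (j + 1) h'
      simpa [hjv] using this
    rw [hstep0] at hstepj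
    have heq : visited[0]'h0len = visited[j + 1]'hj1 := by
      simpa using hstepj
    have := (hndv.getElem_inj_iff).1 heq
    omega

-- Once B has seen a key twice, the chain segment from its first occurrence to cur is a
-- forward-closed set of keys.
theorem evd_closed_of_revisit (eco : List (String × Option String))
    (animal cur : String) (visited : List String)
    (hinv : EvdInv eco animal cur visited)
    (s : String) (hs : evdLookup eco cur = some (some s)) (hsv : s ∈ visited) :
    ∃ C : List String, cur ∈ C ∧
      ∀ c ∈ C, ∃ t, evdLookup eco c = some (some t) ∧ t ∈ evdKeys eco ∧ t ∈ C := by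
  obtain ⟨hcur, hndv, hsub, hch, hlast⟩ := hinv
  have hchain := evdChain_getElem eco visited animal hch
  rcases List.mem_iff_getElem.1 hsv with ⟨m, hm, hms⟩
  have hvne : visited ≠ [] := by intro h; rw [h] at hm; simp at hm
  have hlen1 : visited.length - 1 < visited.length := by omega
  have hcur' : cur = visited[visited.length - 1]'hlen1 := by
    rw [← hlast, List.getLast_cons hvne, List.getLast_eq_getElem]
  refine ⟨visited.drop m, ?_, ?_⟩
  · rw [hcur']
    exact evd_getElem_mem_drop visited m (visited.length - 1) hlen1 (by omega)
  · intro c hc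
    rcases List.mem_iff_getElem.1 hc with ⟨i, hi, hic⟩
    rw [List.length_drop] at hi
    have hmi : m + i < visited.length := by omega
    have hic' : c = visited[m + i]'hmi := by
      rw [← hic, List.getElem_drop]
    by_cases hend : m + i + 1 = visited.length
    · -- c is the last element of visited, i.e. c = cur; its successor is s = visited[m]
      have hcc : c = cur := by
        rw [hic', hcur']
        congr 1; omega
      refine ⟨s, by rw [hcc]; exact hs, hsub s hsv, ?_⟩
      rw [← hms]
      exact evd_getElem_mem_drop visited m m hm (by omega)
    · -- interior element: successor is the next chain element, still inside drop m
      have hmi1 : m + i + 1 < visited.length := by omega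
      have h' : m + i + 1 + 1 < (animal :: visited).length := by simp; omega
      have hstep := hchain (m + i + 1) h'
      simp only [List.getElem_cons_succ] at hstep
      refine ⟨visited[m + i + 1]'hmi1, by rw [hic']; exact hstep,
        hsub _ (List.getElem_mem hmi1), ?_⟩
      exact evd_getElem_mem_drop visited m (m + i + 1) hmi1 (by omega)

-- The coupled run: A's loop + final test from (cur, ind) equals B's loop from (cur, visited)
-- whenever the invariant holds and ind = |visited|.
theorem evd_main (eco : List (String × Option String))
    (animal : String) (ha : animal ∈ evdKeys eco) :
    ∀ (fuel ind : Nat) (cur : String) (visited : List String),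
      eco.length - ind = fuel → EvdInv eco animal cur visited → visited.length = ind →
      evdFinalA eco (evdLoopA eco cur ind) = evdLoopB eco cur visited := by
  intro fuel
  induction fuel with
  | zero =>
    intro ind cur visited hfuel hinv hlen
    -- ind ≥ eco.length; since visited is a nodup list of keys, ind = eco.length exactly
    have hkeyslen : (evdKeys eco).length = eco.length := by simp [evdKeys]
    have hle : visited.length ≤ (evdKeys eco).length :=
      (List.subperm_of_subset hinv.2.1 (fun v hv => hinv.2.2.1 v hv)).length_le
    have hlenfull : visited.length = eco.length := by omega
    rcases evdLookup_isSome eco cur hinv.1 with ⟨v, hv⟩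
    match v, hv with
    | none, hv =>
      rw [evdLoopA_some_none eco cur ind hv, evdLoopB_some_none eco cur visited hv]
      simp [evdFinalA, show ¬ eco.length > ind by omega]
    | some s, hv =>
      have hsk : s ∈ evdKeys eco := evd_no_escape eco animal cur visited ha hinv hlenfull s hv
      have hsv : s ∈ visited := by
        have hperm : visited.Perm (evdKeys eco) :=
          (List.subperm_of_subset hinv.2.1 (fun v hv => hinv.2.2.1 v hv)).perm_of_length_le (by omega)
        exact hperm.mem_iff.2 hsk
      rw [evdLoopA_some_some eco cur ind s hv, evdLoopB_some_some eco cur visited s hv]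
      rw [dif_neg (by intro h; exact absurd h.2 (by omega))]
      rw [if_neg (by simp [hsk])]
      rw [if_pos ((PySem.Set.contains_iff visited s).2 hsv)]
      simp [evdFinalA, show ¬ eco.length > ind by omega]
  | succ f ih =>
    intro ind cur visited hfuel hinv hlen
    have hlt : eco.length > ind := by omega
    rcases evdLookup_isSome eco cur hinv.1 with ⟨v, hv⟩
    match v, hv with
    | none, hv =>
      rw [evdLoopA_some_none eco cur ind hv, evdLoopB_some_none eco cur visited hv]
      simp [evdFinalA, hv]
    | some s, hv =>
      by_cases hsk : s ∈ evdKeys eco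
      · by_cases hsv : s ∈ visited
        · -- B detects the cycle; A keeps walking inside the closed chain segment and ends False
          rw [evdLoopB_some_some eco cur visited s hv]
          rw [if_neg (by simp [hsk])]
          rw [if_pos ((PySem.Set.contains_iff visited s).2 hsv)]
          rcases evd_closed_of_revisit eco animal cur visited hinv s hv hsv with ⟨C, hcC, hC⟩
          exact evdLoopA_closed eco C hC (f + 1) ind cur hfuel hcC
        · -- lockstep step: both advance to s
          rw [evdLoopA_some_some eco cur ind s hv, evdLoopB_some_some eco cur visited s hv]
          rw [dif_pos ⟨List.contains_iff_mem.2 hsk, hlt⟩]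
          rw [if_neg (by simp [hsk])]
          rw [if_neg (by rw [PySem.Set.contains_iff]; exact hsv)]
          have hadd : PySem.Set.add visited s = visited ++ [s] := by
            simp [PySem.Set.add, hsv]
          rw [hadd]
          refine ih (ind + 1) s (visited ++ [s]) (by omega) ?_ (by simp [hlen])
          obtain ⟨hcur, hndv, hsub, hch, hlast⟩ := hinv
          refine ⟨hsk, ?_, ?_, ?_, ?_⟩
          · exact List.Nodup.append hndv (List.nodup_singleton s)
              (fun a ha' hb => hsv ((List.mem_singleton.1 hb) ▸ ha'))
          · intro x hx
            rcases List.mem_append.1 hx with hx | hx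
            · exact hsub x hx
            · simp at hx; rw [hx]; exact hsk
          · refine evdChain_append_singleton eco visited animal s hch ?_
            rw [hlast]
            exact hv
          · have hcongr : (animal :: (visited ++ [s])) = (animal :: visited) ++ [s] := by simp
            rw [List.getLast_congr _ _ hcongr]
            exact List.getLast_concat
      · -- escape: value is a non-key, non-None string → both return True (ind < len)
        rw [evdLoopA_some_some eco cur ind s hv, evdLoopB_some_some eco cur visited s hv]
        rw [dif_neg (by intro h; exact hsk (List.contains_iff_mem.1 h.1))]
        rw [if_pos (by simp [hsk])]
        simp [evdFinalA, hv, hlt]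

-- ===== VERDICT (by name: the statement is the Claim_ definition above) =====
theorem en_voie_disparition_spec : Claim_equal_en_voie_disparition := by
  intro eco animal _ hpre
  have ha' : animal ∈ evdKeys eco := hpre.2
  unfold Spec_en_voie_disparition en_voie_disparition en_voie_disparition_alt
  exact (evd_main eco animal ha' eco.length 0 animal []
    (by omega) ⟨ha', List.nodup_nil, by simp, trivial, rfl⟩ rfl)
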